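-- pv_equiv track=rewrite | github.com/BayajidAlam/node-fleet | lambda/multi_az_helper.py | select_subnet_for_new_instance
-- ===== SOURCE A (Python) =====
-- from typing import List, Dict
--
-- def select_subnet_for_new_instance(existing_instances: List[Dict], available_subnets: List[str]) -> str:
--     """
--     Select subnet for new instance to balance across AZs
--
--     Args:
--         existing_instances: List of current running instances with subnet info
--         available_subnets: List of subnet IDs (ap-south-1a, ap-south-1b)
--
--     Returns:
--         Subnet ID to use for new instance
--     """
--     # Count instances per subnet
--     subnet_counts = {}
--     for subnet_id in available_subnets:
--         subnet_counts[subnet_id] = 0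
--
--     for instance in existing_instances:
--         subnet_id = instance.get('SubnetId')
--         if subnet_id in subnet_counts:
--             subnet_counts[subnet_id] += 1
--
--     # Return subnet with fewest instances (load balancing)
--     return min(subnet_counts, key=subnet_counts.get)
-- ===== SOURCE B (Python) =====
-- def select_subnet_for_new_instance(existing_instances, available_subnets):
--     # min over the subnet list itself; each subnet's load is counted on demand
--     return min(available_subnets,
--                key=lambda s: sum(1 for inst in existing_instances
--                                  if inst.get('SubnetId') == s))
-- ===== Notes on version B (the rewrite author's own statement) =====
-- stated objective: idiomatic
-- what changed: Replaced the prebuilt count-dictionary (init loop + counting loop + min over the dict's keys) by a single min over available_subnets whose key rescans existing_instances to count that subnet's instances on demand.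
import Mathlib
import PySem

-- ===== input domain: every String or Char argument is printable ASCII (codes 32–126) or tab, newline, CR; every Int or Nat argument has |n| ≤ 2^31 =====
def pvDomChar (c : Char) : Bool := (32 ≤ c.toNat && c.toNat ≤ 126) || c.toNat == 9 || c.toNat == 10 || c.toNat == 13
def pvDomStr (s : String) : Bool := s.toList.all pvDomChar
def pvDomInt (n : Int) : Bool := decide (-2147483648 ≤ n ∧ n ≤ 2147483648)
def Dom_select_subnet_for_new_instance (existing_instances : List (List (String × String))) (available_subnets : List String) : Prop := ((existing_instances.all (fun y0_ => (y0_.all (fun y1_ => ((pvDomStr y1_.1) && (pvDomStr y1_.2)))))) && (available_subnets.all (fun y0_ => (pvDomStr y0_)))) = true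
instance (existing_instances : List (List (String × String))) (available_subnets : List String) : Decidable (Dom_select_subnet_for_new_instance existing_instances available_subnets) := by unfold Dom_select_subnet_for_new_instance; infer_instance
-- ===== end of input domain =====

-- B drops A's prebuilt count dictionary: it takes min over available_subnets directly,
-- counting each subnet's instances on demand (idiomatic one-liner; same value everywhere A returns).


-- ===== PORT A =====
-- instance.get('SubnetId') : first-match lookup on the association list
def pvGetSubnetId (inst : List (String × String)) : Option String :=
  (PySem.Dict.mk inst).get? "SubnetId"

-- one iteration of A's counting loop over existing_instances
def pvStepA (d : PySem.Dict String Int) (inst : List (String × String)) : PySem.Dict String Int :=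
  match pvGetSubnetId inst with
  | none => d
  | some sid => if d.contains sid then d.insert sid (d.getD sid 0 + 1) else d

def select_subnet_for_new_instance (existing_instances : List (List (String × String))) (available_subnets : List String) : String :=
  -- subnet_counts = {}; for subnet_id in available_subnets: subnet_counts[subnet_id] = 0
  let d0 : PySem.Dict String Int :=
    available_subnets.foldl (fun d s => d.insert s 0) PySem.Dict.empty
  -- for instance in existing_instances: … if subnet_id in subnet_counts: += 1
  let d1 := existing_instances.foldl pvStepA d0
  -- min(subnet_counts, key=subnet_counts.get); .getD "" is total-only padding (Pre_ excludes the empty case)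
  (PySem.List.min? d1.keys (fun k => d1.getD k 0)).getD ""

-- ===== PORT B =====
def select_subnet_for_new_instance_alt (existing_instances : List (List (String × String))) (available_subnets : List String) : String :=
  -- min(available_subnets, key=lambda s: sum(1 for inst in existing_instances if inst.get('SubnetId') == s))
  (PySem.List.min? available_subnets
    (fun s => (existing_instances.countP (fun inst => pvGetSubnetId inst == some s) : Int))).getD ""

-- ===== PRECONDITION & SPEC =====
-- Pre_ excludes only empty available_subnets, where Python's min raises ValueError (in A and in B alike).
def Pre_select_subnet_for_new_instance (existing_instances : List (List (String × String))) (available_subnets : List String) : Prop := available_subnets ≠ []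
instance (existing_instances : List (List (String × String))) (available_subnets : List String) : Decidable (Pre_select_subnet_for_new_instance existing_instances available_subnets) := by unfold Pre_select_subnet_for_new_instance; infer_instance

def pvWitness_select_subnet_for_new_instance : (List (List (String × String))) × List String :=
  ([[("SubnetId", "s1")]], ["s1", "s2"])

def Spec_select_subnet_for_new_instance (existing_instances : List (List (String × String))) (available_subnets : List String) (out : String) : Prop := out = select_subnet_for_new_instance_alt existing_instances available_subnets
instance (existing_instances : List (List (String × String))) (available_subnets : List String) (out : String) : Decidable (Spec_select_subnet_for_new_instance existing_instances available_subnets out) := by unfold Spec_select_subnet_for_new_instance; infer_instance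

-- ===== CLAIM (what is proved, stated in full; the proofs are below) =====
def Claim_equal_select_subnet_for_new_instance : Prop := ∀ (existing_instances : List (List (String × String))) (available_subnets : List String), Dom_select_subnet_for_new_instance existing_instances available_subnets → Pre_select_subnet_for_new_instance existing_instances available_subnets → Spec_select_subnet_for_new_instance existing_instances available_subnets (select_subnet_for_new_instance existing_instances available_subnets)

-- ===== LEMMAS AND PROOFS =====

-- the foldl step of PySem.List.min?
def pvMinStep {α : Type} (f : α → Int) (acc : Option α) (x : α) : Option α :=
  match acc with
  | none => some x
  | some m => if f x < f m then some x else some m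

lemma min?_eq_foldl {α : Type} (f : α → Int) (xs : List α) :
    PySem.List.min? xs f = xs.foldl (pvMinStep f) none := rfl

-- congruence: min? only looks at the key on elements of the list
lemma foldl_minStep_congr {α : Type} (f g : α → Int) :
    ∀ (xs : List α) (acc : Option α),
      (∀ x ∈ xs, f x = g x) →
      (∀ m, acc = some m → f m = g m) →
      xs.foldl (pvMinStep f) acc = xs.foldl (pvMinStep g) acc := by
  intro xs
  induction xs with
  | nil => intro acc _ _; rfl
  | cons x xs ih =>
    intro acc hx hacc
    have hfx : f x = g x := hx x (by simp)
    have hstep : pvMinStep f acc x = pvMinStep g acc x := by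
      cases acc with
      | none => rfl
      | some m => simp [pvMinStep, hfx, hacc m rfl]
    simp only [List.foldl_cons, hstep]
    refine ih _ (fun y hy => hx y (by simp [hy])) ?_
    intro m hm
    cases acc with
    | none =>
      obtain rfl : x = m := Option.some.inj hm
      exact hfx
    | some m0 =>
      by_cases h : g x < g m0
      · have hm' : (some x : Option α) = some m := by simpa [pvMinStep, h] using hm
        obtain rfl := Option.some.inj hm'
        exact hfx
      · have hm' : (some m0 : Option α) = some m := by simpa [pvMinStep, h] using hm
        obtain rfl := Option.some.inj hm'
        exact hacc m0 rfl

lemma min?_congr {α : Type} (f g : α → Int) (xs : List α)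
    (h : ∀ x ∈ xs, f x = g x) :
    PySem.List.min? xs f = PySem.List.min? xs g := by
  rw [min?_eq_foldl, min?_eq_foldl]
  exact foldl_minStep_congr f g xs none h (by simp)

-- the Set-building foldl only appends
lemma prefix_foldl_add {α : Type} [BEq α] :
    ∀ (xs : List α) (s : PySem.Set α), s <+: xs.foldl PySem.Set.add s := by
  intro xs
  induction xs with
  | nil => intro s; exact List.prefix_refl s
  | cons x xs ih =>
    intro s
    refine List.IsPrefix.trans ?_ (ih (PySem.Set.add s x))
    simp only [PySem.Set.add]
    split
    · exact List.prefix_refl s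
    · exact ⟨[x], rfl⟩

-- min? over the deduplicated list equals min? over the raw list:
-- a repeated element is never strictly below the running minimum reached since its first occurrence
lemma foldl_minStep_dedup {α : Type} [BEq α] [LawfulBEq α] (f : α → Int) :
    ∀ (xs : List α) (s : PySem.Set α) (acc : Option α),
      (∀ y ∈ s, ∃ m, acc = some m ∧ f m ≤ f y) →
      ((xs.foldl PySem.Set.add s).drop s.length).foldl (pvMinStep f) acc
        = xs.foldl (pvMinStep f) acc := by
  intro xs
  induction xs with
  | nil => intro s acc _; simp
  | cons x xs ih =>
    intro s acc hcov
    by_cases hx : s.contains x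
    · -- duplicate: skipped on both sides
      have hxmem : x ∈ s := List.mem_of_elem_eq_true hx
      have hadd : PySem.Set.add s x = s := by simp [PySem.Set.add, hxmem]
      obtain ⟨m, hm, hle⟩ := hcov x hxmem
      have hstep : pvMinStep f acc x = acc := by
        subst hm; simp [pvMinStep, not_lt.mpr hle]
      simp only [List.foldl_cons, hadd, hstep]
      exact ih s acc hcov
    · -- fresh element: it is appended to the set; both sides step with x
      have hxmem : x ∉ s := fun h => hx (List.elem_eq_true_of_mem h)
      have hadd : PySem.Set.add s x = s ++ [x] := by simp [PySem.Set.add, hxmem]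
      have hpre : (s ++ [x]) <+: (xs.foldl PySem.Set.add (s ++ [x])) :=
        prefix_foldl_add xs (s ++ [x])
      obtain ⟨t, ht⟩ := hpre
      have hdrop : (xs.foldl PySem.Set.add (s ++ [x])).drop s.length
          = x :: (xs.foldl PySem.Set.add (s ++ [x])).drop (s ++ [x]).length := by
        rw [← ht]
        have h1 : (s ++ [x] ++ t).drop s.length = [x] ++ t := by
          rw [List.append_assoc]; exact List.drop_left
        have h2 : (s ++ [x] ++ t).drop (s ++ [x]).length = t := List.drop_left
        rw [h1, h2]
        rfl
      simp only [List.foldl_cons, hadd, hdrop]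
      refine ih (s ++ [x]) (pvMinStep f acc x) ?_
      intro y hy
      rcases List.mem_append.mp hy with hys | hyx
      · obtain ⟨m, hm, hle⟩ := hcov y hys
        subst hm
        by_cases h : f x < f m
        · exact ⟨x, by simp [pvMinStep, h], le_trans (le_of_lt h) hle⟩
        · exact ⟨m, by simp [pvMinStep, h], hle⟩
      · have hyx' : y = x := by simpa using hyx
        subst hyx'
        cases acc with
        | none => exact ⟨y, rfl, le_refl _⟩
        | some m =>
          by_cases h : f y < f m
          · exact ⟨y, by simp [pvMinStep, h], le_refl _⟩
          · exact ⟨m, by simp [pvMinStep, h], not_lt.mp h⟩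

lemma min?_ofList {α : Type} [BEq α] [LawfulBEq α] (f : α → Int) (xs : List α) :
    PySem.List.min? (PySem.Set.ofList xs) f = PySem.List.min? xs f := by
  rw [min?_eq_foldl, min?_eq_foldl]
  have h := foldl_minStep_dedup f xs ([] : PySem.Set α) none (by simp)
  simpa [PySem.Set.ofList] using h

-- A's init loop: every stored count is 0
lemma getD_init_zero :
    ∀ (av : List String) (d : PySem.Dict String Int),
      (∀ k, d.getD k 0 = 0) →
      ∀ k, (av.foldl (fun d s => d.insert s 0) d).getD k 0 = 0 := by
  intro av
  induction av with
  | nil => intro d hd k; exact hd k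
  | cons a av ih =>
    intro d hd k
    refine ih _ ?_ k
    intro k'
    rw [PySem.Dict.getD_insert]
    split <;> simp [hd]

-- A's counting loop never changes the key set
lemma contains_stepA (d : PySem.Dict String Int) (inst : List (String × String)) (k : String) :
    (pvStepA d inst).contains k = d.contains k := by
  unfold pvStepA
  cases pvGetSubnetId inst with
  | none => rfl
  | some sid =>
    by_cases h : d.contains sid
    · simp only [h, if_true, PySem.Dict.contains_insert]
      by_cases hk : k = sid
      · subst hk; simp [h]
      · simp [hk]
    · simp [h]

-- A's counting loop computes, for contained keys, the number of matching instances
lemma getD_foldl_stepA :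
    ∀ (ei : List (List (String × String))) (d : PySem.Dict String Int) (k : String),
      (ei.foldl pvStepA d).getD k 0
        = d.getD k 0 + (if d.contains k
            then (ei.countP (fun inst => pvGetSubnetId inst == some k) : Int) else 0) := by
  intro ei
  induction ei with
  | nil => intro d k; simp
  | cons inst ei ih =>
    intro d k
    rw [List.foldl_cons, ih, contains_stepA]
    unfold pvStepA
    cases hg : pvGetSubnetId inst with
    | none => simp [hg]
    | some sid =>
      by_cases hc : d.contains sid
      · simp only [hc, if_true, PySem.Dict.getD_insert]
        by_cases hk : k = sid
        · subst hk; simp [hg, hc]; ring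
        · have : (some sid == some k) = false := by simp [Ne.symm hk]
          simp [hk, hg, this]
      · simp only [hc, Bool.false_eq_true, if_false]
        by_cases hk : k = sid
        · subst hk; simp [hc]
        · have : (some sid == some k) = false := by simp [Ne.symm hk]
          simp [hg, this]

-- A's counting loop never changes the key list itself
lemma keys_foldl_stepA :
    ∀ (ei : List (List (String × String))) (d : PySem.Dict String Int),
      (ei.foldl pvStepA d).keys = d.keys := by
  intro ei
  induction ei with
  | nil => intro d; rfl
  | cons inst ei ih =>
    intro d
    rw [List.foldl_cons, ih]
    unfold pvStepA
    cases pvGetSubnetId inst with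
    | none => rfl
    | some sid =>
      by_cases hc : d.contains sid
      · simp [hc, PySem.Dict.keys_insert_of_contains _ _ hc]
      · simp [hc]

-- ===== VERDICT (by name: the statement is the Claim_ definition above) =====
theorem select_subnet_for_new_instance_spec : Claim_equal_select_subnet_for_new_instance := by
  intro ei av _ _
  unfold Spec_select_subnet_for_new_instance
  unfold select_subnet_for_new_instance select_subnet_for_new_instance_alt
  simp only []
  set d0 : PySem.Dict String Int :=
    av.foldl (fun d s => d.insert s 0) PySem.Dict.empty with hd0
  set d1 := ei.foldl pvStepA d0 with hd1
  have hkeys0 : d0.keys = PySem.Set.ofList av := by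
    rw [hd0]
    have := PySem.Dict.keys_foldl_insert (ν := Int) av (fun _ _ => (0 : Int)) PySem.Dict.empty
    simpa [PySem.Dict.keys_empty, PySem.Set.update_nil_left] using this
  have hkeys1 : d1.keys = PySem.Set.ofList av := by
    rw [hd1, keys_foldl_stepA, hkeys0]
  -- the two key functions agree on the members of the key list
  have hagree : ∀ k ∈ d1.keys,
      d1.getD k 0 = (ei.countP (fun inst => pvGetSubnetId inst == some k) : Int) := by
    intro k hk
    have hc0 : d0.contains k = true := by
      rw [(PySem.Dict.contains_iff_mem_keys d0 k)]
      rw [hkeys0, ← hkeys1]; exact hk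
    have hz : d0.getD k 0 = 0 := by
      rw [hd0]
      exact getD_init_zero av PySem.Dict.empty (by simp) k
    rw [hd1, getD_foldl_stepA ei d0 k, hz, hc0]
    simp
  calc (PySem.List.min? d1.keys (fun k => d1.getD k 0)).getD ""
      = (PySem.List.min? d1.keys
          (fun k => (ei.countP (fun inst => pvGetSubnetId inst == some k) : Int))).getD "" := by
        rw [min?_congr _ _ _ hagree]
    _ = (PySem.List.min? av
          (fun k => (ei.countP (fun inst => pvGetSubnetId inst == some k) : Int))).getD "" := by
        rw [hkeys1, min?_ofList]
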